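-- pv_equiv track=rewrite | github.com/dhruvbhargav08/DSA | Minimum_X_(xor)_A.py | minVal
-- ===== SOURCE A (Python) =====
-- def minVal(a, b):
--     #code here
--     def countBits(x):
--         res=0
--         while x>0:
--             if x%2:
--                 res+=1
--             x//=2
--         return res
--     def convert(x):
--         res=""
--         while x>0:
--             res=str(x%2)+res
--             x//=2
--         return res
--     def decimal(x):
--         res=0
--         base=1
--         i=len(x)-1
--         while i>=0:
--             res+=base*(int(x[i]))
--             base*=2
--             i-=1
--         return res
--     curr=convert(a)
--     count=countBits(b)
--     i=0
--     ans=[]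
--     while i<len(curr):
--         if curr[i]=="1":
--             if count>0:
--                 ans+=["1"]
--                 count-=1
--             else:
--                 ans+=["0"]
--         else:
--             ans+=["0"]
--         i+=1
--     last=len(ans)-1
--     while count>0 and last>=0:
--         if ans[last]=="0":
--             ans[last]="1"
--             count-=1
--         last-=1
--     return decimal(ans)
-- ===== SOURCE B (Python) =====
-- def minVal(a, b):
--     # One numeric LSB-first pass: drop the (p-k) lowest set bits when k<=p,
--     # else fill the (k-p) lowest zero bits below a's bit length.
--     def pop(x):
--         c = 0
--         while x > 0:
--             c += x & 1
--             x >>= 1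
--         return c
--     k = pop(b)
--     p = pop(a)
--     drop = p - k if p > k else 0
--     need = k - p if k > p else 0
--     res = 0
--     w = 1
--     x = a
--     while x > 0:
--         if x & 1:
--             if drop > 0:
--                 drop -= 1
--             else:
--                 res += w
--         elif need > 0:
--             need -= 1
--             res += w
--         w *= 2
--         x >>= 1
--     return res
-- ===== Notes on version B (the rewrite author's own statement) =====
-- stated objective: simpler
-- what changed: A converts a to a binary string, scans it MSB-first keeping the first popcount(b) ones, then mutates the list from the end to fill low zeros and converts back to decimal; B never builds strings: it computes both popcounts, then does one numeric LSB-first pass over a's bits that drops the (p-k) lowest set bits or sets the (k-p) lowest zero bits while accumulating the value directly.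
import Mathlib
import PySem

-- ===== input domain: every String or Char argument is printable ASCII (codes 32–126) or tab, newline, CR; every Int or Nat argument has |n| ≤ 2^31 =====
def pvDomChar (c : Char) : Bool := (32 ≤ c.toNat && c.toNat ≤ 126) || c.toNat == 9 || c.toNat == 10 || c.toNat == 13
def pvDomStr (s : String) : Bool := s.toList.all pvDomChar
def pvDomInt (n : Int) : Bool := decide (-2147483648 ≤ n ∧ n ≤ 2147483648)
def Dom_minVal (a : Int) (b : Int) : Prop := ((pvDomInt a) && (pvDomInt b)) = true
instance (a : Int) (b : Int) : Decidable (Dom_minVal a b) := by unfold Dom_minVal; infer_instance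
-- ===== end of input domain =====

-- B replaces A's binary-string pipeline (convert / keep-first-k-ones scan / fill-zeros-from-the-end /
-- string-to-decimal) by a single numeric LSB-first pass over a's bits; objective: simpler, same cost.

-- lemma used by the ports' termination proofs (`x >>= 1` / `x //= 2` on a positive int shrinks it)
theorem pvShr1_eq_floordiv (x : Int) : x >>> (1 : Nat) = PySem.Int.floordiv x 2 := by
  rw [PySem.Int.floordiv_eq_ediv_of_pos (by norm_num), Int.shiftRight_eq_div_pow]; norm_num

theorem pvFloordiv2_toNat_lt {x : Int} (h : 0 < x) :
    (PySem.Int.floordiv x 2).toNat < x.toNat := by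
  rw [PySem.Int.floordiv_eq_ediv_of_pos (by norm_num)]; omega

-- ===== PORT A =====
-- inner helper countBits(x)
def pyCountBits (x : Int) (res : Int) : Int :=
  if h : 0 < x then
    pyCountBits (PySem.Int.floordiv x 2) (if PySem.Int.mod x 2 ≠ 0 then res + 1 else res)
  else res
termination_by x.toNat
decreasing_by exact pvFloordiv2_toNat_lt h

-- inner helper convert(x): builds the binary string MSB-first (modelled as List Char)
def pyConvert (x : Int) : List Char :=
  if h : 0 < x then pyConvert (PySem.Int.floordiv x 2) ++ PySem.Int.toChars (PySem.Int.mod x 2)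
  else []
termination_by x.toNat
decreasing_by exact pvFloordiv2_toNat_lt h

-- the `while i < len(curr)` loop building ans (each "0"/"1" one-char string modelled as a Char)
def pyLoop1 : List Char → List Char → Int → List Char × Int
  | [], ans, count => (ans, count)
  | c :: t, ans, count =>
    if c = '1' then
      if 0 < count then pyLoop1 t (ans ++ ['1']) (count - 1)
      else pyLoop1 t (ans ++ ['0']) count
    else pyLoop1 t (ans ++ ['0']) count

-- the `while count>0 and last>=0` loop mutating ans in place
def pyLoop2 (ans : List Char) (count : Int) (last : Int) : List Char :=
  if 0 < count ∧ 0 ≤ last then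
    if (PySem.List.pyGet? ans last).getD ' ' = '0' then
      pyLoop2 (ans.set last.toNat '1') (count - 1) (last - 1)
    else pyLoop2 ans count (last - 1)
  else ans
termination_by (last + 1).toNat
decreasing_by all_goals omega

-- inner helper decimal(x): index loop from len-1 down to 0 = fold over x.reverse
def pyDecimalGo : List Char → Int → Int → Int
  | [], res, _ => res
  | c :: t, res, base => pyDecimalGo t (res + base * (PySem.Int.ofChars? [c]).getD 0) (base * 2)

def pyDecimal (x : List Char) : Int := pyDecimalGo x.reverse 0 1

def minVal (a : Int) (b : Int) : Int :=
  let curr := pyConvert a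
  let count := pyCountBits b 0
  let r := pyLoop1 curr [] count
  let ans := pyLoop2 r.1 r.2 ((r.1.length : Int) - 1)
  pyDecimal ans

-- ===== PORT B =====
-- helper pop(x): popcount via `x & 1` / `x >>= 1`
def bPop (x : Int) (c : Int) : Int :=
  if h : 0 < x then bPop (x >>> (1 : Nat)) (c + PySem.Int.band x 1) else c
termination_by x.toNat
decreasing_by rw [pvShr1_eq_floordiv]; exact pvFloordiv2_toNat_lt h

-- the single `while x > 0` pass: drop `drop` lowest ones, set `need` lowest zeros, accumulate res
def bLoop (x res w drop need : Int) : Int :=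
  if h : 0 < x then
    if PySem.Int.band x 1 ≠ 0 then
      if 0 < drop then bLoop (x >>> (1 : Nat)) res (w * 2) (drop - 1) need
      else bLoop (x >>> (1 : Nat)) (res + w) (w * 2) drop need
    else if 0 < need then bLoop (x >>> (1 : Nat)) (res + w) (w * 2) drop (need - 1)
    else bLoop (x >>> (1 : Nat)) res (w * 2) drop need
  else res
termination_by x.toNat
decreasing_by all_goals (rw [pvShr1_eq_floordiv]; exact pvFloordiv2_toNat_lt h)

def minVal_alt (a : Int) (b : Int) : Int :=
  let k := bPop b 0
  let p := bPop a 0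
  let drop := if k < p then p - k else 0
  let need := if p < k then k - p else 0
  bLoop a 0 1 drop need

-- ===== PRECONDITION & SPEC =====
def Spec_minVal (a : Int) (b : Int) (out : Int) : Prop := out = minVal_alt a b
instance (a : Int) (b : Int) (out : Int) : Decidable (Spec_minVal a b out) := by unfold Spec_minVal; infer_instance

-- ===== CLAIM (what is proved, stated in full; the proofs are below) =====
def Claim_equal_minVal : Prop := ∀ (a : Int) (b : Int), Dom_minVal a b → Spec_minVal a b (minVal a b)

-- ===== LEMMAS AND PROOFS =====

-- LSB-first list of binary digit chars of x
def clLSB (x : Int) : List Char :=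
  if h : 0 < x then PySem.Int.toChars (PySem.Int.mod x 2) ++ clLSB (PySem.Int.floordiv x 2)
  else []
termination_by x.toNat
decreasing_by exact pvFloordiv2_toNat_lt h

-- MSB-first: keep the first `cnt` ones, zero the rest (what pyLoop1 appends)
def kOnes : List Char → Int → List Char
  | [], _ => []
  | c :: t, cnt =>
    if c = '1' then
      if 0 < cnt then '1' :: kOnes t (cnt - 1) else '0' :: kOnes t cnt
    else '0' :: kOnes t cnt

def kCnt : List Char → Int → Int
  | [], cnt => cnt
  | c :: t, cnt => if c = '1' ∧ 0 < cnt then kCnt t (cnt - 1) else kCnt t cnt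

-- LSB-first: zero the first `d` ones
def dOnes : List Char → Int → List Char
  | [], _ => []
  | c :: t, d =>
    if c = '1' then
      if 0 < d then '0' :: dOnes t (d - 1) else c :: dOnes t d
    else c :: dOnes t d

-- LSB-first: set the first `nd` zeros (what pyLoop2 does, seen from the low end)
def fZeros (l : List Char) (nd : Int) : List Char :=
  if 0 < nd then
    match l with
    | [] => []
    | c :: t => if c = '0' then '1' :: fZeros t (nd - 1) else c :: fZeros t nd
  else l

-- value of an LSB-first digit-char list
def chVal : List Char → Int
  | [] => 0
  | c :: t => (PySem.Int.ofChars? [c]).getD 0 + 2 * chVal t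

-- reference value: B's pass without accumulators
def pvV (x d nd : Int) : Int :=
  if h : 0 < x then
    if PySem.Int.band x 1 ≠ 0 then
      if 0 < d then 2 * pvV (x >>> (1 : Nat)) (d - 1) nd
      else 1 + 2 * pvV (x >>> (1 : Nat)) d nd
    else if 0 < nd then 1 + 2 * pvV (x >>> (1 : Nat)) d (nd - 1)
    else 2 * pvV (x >>> (1 : Nat)) d nd
  else 0
termination_by x.toNat
decreasing_by all_goals (rw [pvShr1_eq_floordiv]; exact pvFloordiv2_toNat_lt h)

theorem pvMod2 (x : Int) : PySem.Int.mod x 2 = 0 ∨ PySem.Int.mod x 2 = 1 := by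
  have h1 : 0 ≤ PySem.Int.mod x 2 := PySem.Int.mod_nonneg x (by norm_num)
  have h2 : PySem.Int.mod x 2 < 2 := PySem.Int.mod_lt x (by norm_num)
  omega

theorem conv_rev (x : Int) : (pyConvert x).reverse = clLSB x := by
  rw [pyConvert, clLSB]
  by_cases h : 0 < x
  · rw [dif_pos h, dif_pos h, List.reverse_append, conv_rev (PySem.Int.floordiv x 2)]
    congr 1
    rcases pvMod2 x with h0 | h0 <;> rw [h0] <;> decide
  · rw [dif_neg h, dif_neg h]; rfl
termination_by x.toNat
decreasing_by exact pvFloordiv2_toNat_lt h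

theorem clLSB_chars (x : Int) : ∀ c ∈ clLSB x, c = '0' ∨ c = '1' := by
  rw [clLSB]
  by_cases h : 0 < x
  · rw [dif_pos h]
    intro c hc
    rw [List.mem_append] at hc
    rcases hc with hc | hc
    · rcases pvMod2 x with h0 | h0
      · rw [h0, show PySem.Int.toChars 0 = ['0'] by decide] at hc
        simp at hc; exact Or.inl hc
      · rw [h0, show PySem.Int.toChars 1 = ['1'] by decide] at hc
        simp at hc; exact Or.inr hc
    · exact clLSB_chars (PySem.Int.floordiv x 2) c hc
  · rw [dif_neg h]; intro c hc; simp at hc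
termination_by x.toNat
decreasing_by exact pvFloordiv2_toNat_lt h

theorem pyCountBits_acc (x : Int) : ∀ r : Int, pyCountBits x r = r + pyCountBits x 0 := by
  intro r
  rw [pyCountBits]
  conv_rhs => rw [pyCountBits]
  by_cases h : 0 < x
  · rw [dif_pos h, dif_pos h,
      pyCountBits_acc (PySem.Int.floordiv x 2) (if PySem.Int.mod x 2 ≠ 0 then r + 1 else r),
      pyCountBits_acc (PySem.Int.floordiv x 2) (if PySem.Int.mod x 2 ≠ 0 then 0 + 1 else 0)]
    split <;> ring
  · rw [dif_neg h, dif_neg h]; ring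
termination_by x.toNat
decreasing_by all_goals exact pvFloordiv2_toNat_lt h

theorem pyCountBits_ge (x : Int) : ∀ r : Int, r ≤ pyCountBits x r := by
  intro r
  rw [pyCountBits]
  by_cases h : 0 < x
  · rw [dif_pos h]
    split
    · have := pyCountBits_ge (PySem.Int.floordiv x 2) (r + 1); omega
    · exact pyCountBits_ge (PySem.Int.floordiv x 2) r
  · rw [dif_neg h]
termination_by x.toNat
decreasing_by all_goals exact pvFloordiv2_toNat_lt h

theorem pyCountBits_nonneg (x : Int) : 0 ≤ pyCountBits x 0 := pyCountBits_ge x 0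

theorem clLSB_ones (x : Int) : ((clLSB x).count '1' : Int) = pyCountBits x 0 := by
  rw [clLSB, pyCountBits]
  by_cases h : 0 < x
  · rw [dif_pos h, dif_pos h, List.count_append, pyCountBits_acc]
    have ih := clLSB_ones (PySem.Int.floordiv x 2)
    rw [PySem.Int.floordiv_eq_ediv_of_pos (by norm_num : (0:Int) < 2)] at ih
    rcases pvMod2 x with h0 | h0
    · rw [h0, show List.count '1' (PySem.Int.toChars 0) = 0 by decide]
      norm_num
      omega
    · rw [h0, show List.count '1' (PySem.Int.toChars 1) = 1 by decide]
      norm_num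
      omega
  · rw [dif_neg h, dif_neg h]; rfl
termination_by x.toNat
decreasing_by all_goals exact pvFloordiv2_toNat_lt h

theorem popEq (x : Int) : ∀ r : Int, pyCountBits x r = bPop x r := by
  intro r
  rw [pyCountBits, bPop]
  by_cases h : 0 < x
  · rw [dif_pos h, dif_pos h, pvShr1_eq_floordiv, popEq (PySem.Int.floordiv x 2)]
    congr 1
    rw [PySem.Int.band_one]
    rcases pvMod2 x with h0 | h0 <;> rw [h0] <;> norm_num
  · rw [dif_neg h, dif_neg h]
termination_by x.toNat
decreasing_by all_goals exact pvFloordiv2_toNat_lt h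

theorem loop1_eq (t : List Char) : ∀ ans cnt, pyLoop1 t ans cnt = (ans ++ kOnes t cnt, kCnt t cnt) := by
  induction t with
  | nil => intro ans cnt; simp [pyLoop1, kOnes, kCnt]
  | cons c t ih =>
    intro ans cnt
    simp only [pyLoop1, kOnes, kCnt]
    split_ifs with h1 h2 <;> simp_all

theorem dOnes_congr_nonpos {d d' : Int} (l : List Char) (h : d ≤ 0) (h' : d' ≤ 0) :
    dOnes l d = dOnes l d' := by
  induction l with
  | nil => rfl
  | cons c t ih =>
    simp only [dOnes]
    have hd : ¬ 0 < d := by omega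
    have hd' : ¬ 0 < d' := by omega
    split_ifs <;> simp [ih]

theorem dOnes_congr_ge (l : List Char) : ∀ {d d' : Int}, (l.count '1' : Int) ≤ d →
    (l.count '1' : Int) ≤ d' → dOnes l d = dOnes l d' := by
  induction l with
  | nil => intros; rfl
  | cons c t ih =>
    intro d d' h h'
    by_cases hc : c = '1'
    · subst hc
      simp at h h'
      have hd : 0 < d := by omega
      have hd' : 0 < d' := by omega
      simp only [dOnes, if_true]
      rw [if_pos hd, if_pos hd', ih (d := d - 1) (d' := d' - 1) (by omega) (by omega)]
    · simp [hc] at h h'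
      simp only [dOnes]
      rw [if_neg hc, if_neg hc, ih (d := d) (d' := d') (by omega) (by omega)]

theorem dOnes_snoc_zero (xs : List Char) (c : Char) (hc : ¬ c = '1') : ∀ d : Int,
    dOnes (xs ++ [c]) d = dOnes xs d ++ [c] := by
  induction xs with
  | nil => intro d; simp [dOnes, hc]
  | cons x xs ih =>
    intro d
    simp only [List.cons_append, dOnes]
    split_ifs <;> simp [ih]

theorem dOnes_snoc_one_le (xs : List Char) : ∀ d : Int, d ≤ (xs.count '1' : Int) →
    dOnes (xs ++ ['1']) d = dOnes xs d ++ ['1'] := by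
  induction xs with
  | nil =>
    intro d h
    simp at h
    simp [dOnes, show ¬ 0 < d by omega]
  | cons x xs ih =>
    intro d h
    simp only [List.cons_append, dOnes]
    by_cases hx : x = '1'
    · subst hx
      simp at h
      rw [if_pos (rfl : ('1':Char) = '1'), if_pos (rfl : ('1':Char) = '1')]
      by_cases hd : 0 < d
      · rw [if_pos hd, if_pos hd, ih (d - 1) (by omega)]; simp
      · rw [if_neg hd, if_neg hd, ih d (by omega)]; simp
    · simp [hx] at h
      rw [if_neg hx, if_neg hx, ih d (by omega)]
      simp

theorem dOnes_snoc_one_gt (xs : List Char) : ∀ d : Int, (xs.count '1' : Int) < d →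
    dOnes (xs ++ ['1']) d = dOnes xs d ++ ['0'] := by
  induction xs with
  | nil =>
    intro d h
    simp at h
    simp [dOnes, show 0 < d by omega]
  | cons x xs ih =>
    intro d h
    simp only [List.cons_append, dOnes]
    by_cases hx : x = '1'
    · subst hx
      simp at h
      have hd : 0 < d := by omega
      rw [if_pos rfl, if_pos rfl, if_pos hd, if_pos hd, ih (d - 1) (by omega)]
      simp
    · simp [hx] at h
      rw [if_neg hx, if_neg hx, ih d (by omega)]
      simp

-- the reversal bridge: pyLoop1's MSB-first keep = dOnes on the reversed (LSB-first) list
theorem kOnes_rev (l : List Char) : ∀ cnt, (∀ c ∈ l, c = '0' ∨ c = '1') →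
    (kOnes l cnt).reverse = dOnes l.reverse ((l.count '1' : Int) - cnt) := by
  induction l with
  | nil => intro cnt _; rfl
  | cons c t ih =>
    intro cnt hch
    have ht : ∀ x ∈ t, x = '0' ∨ x = '1' := fun x hx => hch x (List.mem_cons_of_mem c hx)
    rcases hch c List.mem_cons_self with hc | hc
    · subst hc
      have hcc : ((('0' :: t).count '1' : Int)) = (t.count '1' : Int) := by
        simp
      simp only [kOnes]
      rw [if_neg (by decide : ¬ ('0':Char) = '1'), hcc, List.reverse_cons, List.reverse_cons,
        dOnes_snoc_zero t.reverse '0' (by decide), ih cnt ht]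
    · subst hc
      have hcc : ((('1' :: t).count '1' : Int)) = (t.count '1' : Int) + 1 := by
        simp
      simp only [kOnes]
      rw [if_pos trivial, hcc, List.reverse_cons]
      by_cases hcnt : 0 < cnt
      · rw [if_pos hcnt, List.reverse_cons, ih (cnt - 1) ht,
          dOnes_snoc_one_le t.reverse ((t.count '1' : Int) + 1 - cnt)
            (by rw [List.count_reverse]; omega)]
        have : (t.count '1' : Int) - (cnt - 1) = (t.count '1' : Int) + 1 - cnt := by ring
        rw [this]
      · rw [if_neg hcnt, List.reverse_cons, ih cnt ht,
          dOnes_snoc_one_gt t.reverse ((t.count '1' : Int) + 1 - cnt)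
            (by rw [List.count_reverse]; omega)]
        have e1 : (t.reverse.count '1' : Int) ≤ (t.count '1' : Int) - cnt := by
          rw [List.count_reverse]; omega
        have e2 : (t.reverse.count '1' : Int) ≤ (t.count '1' : Int) + 1 - cnt := by
          rw [List.count_reverse]; omega
        rw [dOnes_congr_ge t.reverse e1 e2]

theorem kCnt_eq (l : List Char) : ∀ cnt : Int, 0 ≤ cnt →
    kCnt l cnt = max (cnt - (l.count '1' : Int)) 0 := by
  induction l with
  | nil => intro cnt h; simp [kCnt]; omega
  | cons c t ih =>
    intro cnt h
    simp only [kCnt]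
    by_cases hc : c = '1' <;> by_cases hcnt : 0 < cnt
    · rw [if_pos ⟨hc, hcnt⟩, ih (cnt - 1) (by omega)]
      subst hc; simp; omega
    · rw [if_neg (by tauto), ih cnt h]
      subst hc; simp; omega
    · rw [if_neg (by tauto), ih cnt h]
      simp [hc]
    · rw [if_neg (by tauto), ih cnt h]
      simp [hc]

-- unfolding helpers for fZeros / dOnes / chVal on explicit heads
theorem fZeros_cons_zero (t : List Char) {nd : Int} (h : 0 < nd) :
    fZeros ('0' :: t) nd = '1' :: fZeros t (nd - 1) := by
  rw [fZeros, if_pos h]; simp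

theorem fZeros_cons_one (t : List Char) {nd : Int} (h : 0 < nd) :
    fZeros ('1' :: t) nd = '1' :: fZeros t nd := by
  rw [fZeros, if_pos h]; simp

theorem dOnes_cons_zero (t : List Char) (d : Int) : dOnes ('0' :: t) d = '0' :: dOnes t d := by
  simp [dOnes]

theorem dOnes_cons_one_pos (t : List Char) {d : Int} (h : 0 < d) :
    dOnes ('1' :: t) d = '0' :: dOnes t (d - 1) := by
  simp [dOnes, h]

theorem dOnes_cons_one_nonpos (t : List Char) {d : Int} (h : ¬ 0 < d) :
    dOnes ('1' :: t) d = '1' :: dOnes t d := by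
  simp [dOnes, h]

theorem chVal_cons_zero (t : List Char) : chVal ('0' :: t) = 2 * chVal t := by
  rw [chVal, show (PySem.Int.ofChars? ['0']).getD 0 = 0 from by decide]
  ring

theorem chVal_cons_one (t : List Char) : chVal ('1' :: t) = 1 + 2 * chVal t := by
  rw [chVal, show (PySem.Int.ofChars? ['1']).getD 0 = 1 from by decide]

theorem fZeros_cons_ne (c : Char) (t : List Char) {nd : Int} (hc : ¬ c = '0') (h : 0 < nd) :
    fZeros (c :: t) nd = c :: fZeros t nd := by
  rw [fZeros, if_pos h]; simp [hc]

theorem fZeros_nil (nd : Int) : fZeros [] nd = [] := by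
  rw [fZeros]; split <;> rfl

theorem fZeros_nonpos (l : List Char) {nd : Int} (h : nd ≤ 0) : fZeros l nd = l := by
  cases l <;> rw [fZeros, if_neg (by omega)]

theorem loop2_eq (ys : List Char) : ∀ (rest : List Char) (cnt : Int),
    pyLoop2 (ys ++ rest) cnt ((ys.length : Int) - 1) = (fZeros ys.reverse cnt).reverse ++ rest := by
  induction ys using List.reverseRecOn with
  | nil =>
    intro rest cnt
    rw [pyLoop2, if_neg (by rintro ⟨h1, h2⟩; simp at h2)]
    rw [List.reverse_nil, fZeros_nil]
    simp
  | append_singleton ys z ih =>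
    intro rest cnt
    rw [pyLoop2]
    have hlen : (((ys ++ [z]).length : Nat) : Int) - 1 = (ys.length : Int) := by
      simp
    rw [hlen]
    have hassoc : (ys ++ [z]) ++ rest = ys ++ (z :: rest) := by simp
    have hget : (PySem.List.pyGet? ((ys ++ [z]) ++ rest) ((ys.length : Nat) : Int)).getD ' ' = z := by
      rw [hassoc]
      rw [show PySem.List.pyGet? (ys ++ z :: rest) ((ys.length : Nat) : Int)
            = (ys ++ z :: rest)[ys.length]? from by simp [pysem]]
      rw [List.getElem?_append_right (le_refl _)]
      simp
    have hrev : (ys ++ [z]).reverse = z :: ys.reverse := by simp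
    by_cases hcnt : 0 < cnt
    · rw [if_pos ⟨hcnt, by positivity⟩, hget]
      by_cases hz : z = '0'
      · rw [if_pos hz]
        have hset : ((ys ++ [z]) ++ rest).set ((ys.length : Nat) : Int).toNat '1'
            = ys ++ ('1' :: rest) := by
          rw [hassoc]; simp
        rw [hset, ih ('1' :: rest) (cnt - 1), hrev, hz, fZeros_cons_zero _ hcnt]
        simp
      · rw [if_neg hz, hassoc, ih (z :: rest) cnt, hrev, fZeros_cons_ne z ys.reverse hz hcnt]
        simp
    · rw [if_neg (by tauto), hrev, fZeros_nonpos _ (by omega)]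
      simp

theorem decGo_eq (l : List Char) : ∀ res base, pyDecimalGo l res base = res + base * chVal l := by
  induction l with
  | nil => intro res base; rw [pyDecimalGo, chVal]; ring
  | cons c t ih =>
    intro res base
    rw [pyDecimalGo, chVal, ih]
    ring

theorem bLoop_eq (x : Int) : ∀ res w d nd, bLoop x res w d nd = res + w * pvV x d nd := by
  intro res w d nd
  rw [bLoop, pvV]
  by_cases h : 0 < x
  · rw [dif_pos h, dif_pos h]
    by_cases h1 : PySem.Int.band x 1 ≠ 0
    · rw [if_pos h1, if_pos h1]
      by_cases h2 : 0 < d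
      · rw [if_pos h2, if_pos h2, bLoop_eq (x >>> (1 : Nat)) res (w * 2) (d - 1) nd]; ring
      · rw [if_neg h2, if_neg h2, bLoop_eq (x >>> (1 : Nat)) (res + w) (w * 2) d nd]; ring
    · rw [if_neg h1, if_neg h1]
      by_cases h2 : 0 < nd
      · rw [if_pos h2, if_pos h2, bLoop_eq (x >>> (1 : Nat)) (res + w) (w * 2) d (nd - 1)]; ring
      · rw [if_neg h2, if_neg h2, bLoop_eq (x >>> (1 : Nat)) res (w * 2) d nd]; ring
  · rw [dif_neg h, dif_neg h]; ring
termination_by x.toNat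
decreasing_by all_goals (rw [pvShr1_eq_floordiv]; exact pvFloordiv2_toNat_lt h)

theorem main_val (x : Int) : ∀ d nd : Int, d ≤ 0 ∨ nd ≤ 0 →
    chVal (fZeros (dOnes (clLSB x) d) nd) = pvV x d nd := by
  intro d nd hyp
  rw [clLSB, pvV]
  by_cases h : 0 < x
  · rw [dif_pos h, dif_pos h]
    have hsh : x >>> (1 : Nat) = PySem.Int.floordiv x 2 := pvShr1_eq_floordiv x
    rcases pvMod2 x with h0 | h0
    · have hb : ¬ (PySem.Int.band x 1 ≠ 0) := by rw [PySem.Int.band_one, h0]; simp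
      rw [if_neg hb, h0, show PySem.Int.toChars 0 = ['0'] from by decide, List.singleton_append,
        dOnes_cons_zero]
      by_cases h2 : 0 < nd
      · rw [if_pos h2, fZeros_cons_zero _ h2, chVal_cons_one,
          main_val (PySem.Int.floordiv x 2) d (nd - 1) (by rcases hyp with hh | hh <;> omega), hsh]
      · rw [if_neg h2, fZeros_nonpos _ (by omega), chVal_cons_zero,
          ← fZeros_nonpos (dOnes (clLSB (PySem.Int.floordiv x 2)) d) (show nd ≤ 0 by omega),
          main_val (PySem.Int.floordiv x 2) d nd hyp, hsh]
    · have hb : PySem.Int.band x 1 ≠ 0 := by rw [PySem.Int.band_one, h0]; norm_num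
      rw [if_pos hb, h0, show PySem.Int.toChars 1 = ['1'] from by decide, List.singleton_append]
      by_cases h2 : 0 < d
      · have hnd : nd ≤ 0 := by rcases hyp with hh | hh <;> omega
        rw [if_pos h2, dOnes_cons_one_pos _ h2, fZeros_nonpos _ hnd, chVal_cons_zero,
          ← fZeros_nonpos (dOnes (clLSB (PySem.Int.floordiv x 2)) (d - 1)) hnd,
          main_val (PySem.Int.floordiv x 2) (d - 1) nd (Or.inr hnd), hsh]
      · rw [if_neg h2, dOnes_cons_one_nonpos _ h2]
        by_cases h3 : 0 < nd
        · rw [fZeros_cons_one _ h3, chVal_cons_one,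
            main_val (PySem.Int.floordiv x 2) d nd hyp, hsh]
        · rw [fZeros_nonpos _ (by omega), chVal_cons_one,
            ← fZeros_nonpos (dOnes (clLSB (PySem.Int.floordiv x 2)) d) (show nd ≤ 0 by omega),
            main_val (PySem.Int.floordiv x 2) d nd hyp, hsh]
  · rw [dif_neg h, dif_neg h]
    rw [show dOnes [] d = [] from rfl, fZeros_nil, chVal]
termination_by x.toNat
decreasing_by all_goals exact pvFloordiv2_toNat_lt h

-- ===== VERDICT (by name: the statement is the Claim_ definition above) =====
theorem minVal_spec : Claim_equal_minVal := by
  intro a b _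
  show minVal a b = minVal_alt a b
  unfold minVal minVal_alt
  dsimp only
  rw [loop1_eq]
  simp only [List.nil_append]
  have hl2 := loop2_eq (kOnes (pyConvert a) (pyCountBits b 0)) []
    (kCnt (pyConvert a) (pyCountBits b 0))
  simp only [List.append_nil] at hl2
  rw [hl2]
  unfold pyDecimal
  rw [List.reverse_reverse, decGo_eq]
  have hcur : pyConvert a = (clLSB a).reverse := by rw [← conv_rev a, List.reverse_reverse]
  have hch : ∀ c ∈ pyConvert a, c = '0' ∨ c = '1' := by
    rw [hcur]; intro c hc; exact clLSB_chars a c (List.mem_reverse.mp hc)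
  have hcnt : ((pyConvert a).count '1' : Int) = pyCountBits a 0 := by
    rw [hcur, List.count_reverse, clLSB_ones]
  rw [kOnes_rev (pyConvert a) (pyCountBits b 0) hch, conv_rev a, hcnt,
    kCnt_eq (pyConvert a) (pyCountBits b 0) (pyCountBits_nonneg b), hcnt,
    ← popEq a 0, ← popEq b 0, bLoop_eq a 0 1]
  set P := pyCountBits a 0 with hP
  set K := pyCountBits b 0 with hK
  rcases (show P ≤ K ∨ K < P by omega) with hpk | hkp
  · rw [if_neg (by omega), show (if P < K then K - P else 0) = K - P from by split_ifs <;> omega,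
      show max (K - P) 0 = K - P from by omega,
      dOnes_congr_nonpos (clLSB a) (show P - K ≤ 0 by omega) (le_refl 0),
      main_val a 0 (K - P) (Or.inl le_rfl)]
  · rw [if_pos hkp, if_neg (by omega), show max (K - P) 0 = 0 from by omega,
      main_val a (P - K) 0 (Or.inr le_rfl)]
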